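-- pv_equiv track=rewrite | github.com/RangelGasharov/python-basics | algorithms/leetcode_number_of_strings_with_only_ones.py | num_sub_2
-- ===== SOURCE A (Python) =====
-- def num_sub_2(s: str) -> int:
--     sum_substrings = 0
--     nums = s.split('0')
--     for n in nums:
--         m = len(n)
--         if m > 0:
--             sum_substrings += (m * (m + 1)) // 2
--     return sum_substrings % (10 ** 9 + 7)
-- ===== SOURCE B (Python) =====
-- def num_sub_2(s: str) -> int:
--     total = 0
--     count = 0
--     for ch in s:
--         if ch != '0':
--             count += 1
--             total += count
--         else:
--             count = 0
--     return total % (10 ** 9 + 7)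
-- ===== Notes on version B (the rewrite author's own statement) =====
-- stated objective: alternative
-- what changed: B replaces the split-on-zeros pass with its closed-form m*(m+1)//2 per run by a single character scan that keeps a running run-length and adds it incrementally to the total.
import Mathlib
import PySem

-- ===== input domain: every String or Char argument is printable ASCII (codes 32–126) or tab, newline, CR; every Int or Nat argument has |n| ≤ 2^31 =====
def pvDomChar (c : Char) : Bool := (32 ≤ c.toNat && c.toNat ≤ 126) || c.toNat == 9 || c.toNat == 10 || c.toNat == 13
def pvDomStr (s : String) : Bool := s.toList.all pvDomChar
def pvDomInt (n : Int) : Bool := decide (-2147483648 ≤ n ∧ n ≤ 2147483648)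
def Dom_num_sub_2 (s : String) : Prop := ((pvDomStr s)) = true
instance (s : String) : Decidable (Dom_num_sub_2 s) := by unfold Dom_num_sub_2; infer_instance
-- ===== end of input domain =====

-- B replaces split('0') + the closed-form m*(m+1)//2 per run with one scan that keeps a
-- running run-length `count` and adds it incrementally (objective: alternative, same cost).

-- ===== PORT A =====
-- loop body of A's `for n in nums`
def pvAStep (acc : Int) (n : String) : Int :=
  let m := PySem.Str.len n
  if m > 0 then acc + PySem.Int.floordiv (m * (m + 1)) 2 else acc

def num_sub_2 (s : String) : Int :=
  let nums := (PySem.Str.split? s "0").getD []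
  PySem.Int.mod (nums.foldl pvAStep 0) (10 ^ 9 + 7)

-- ===== PORT B =====
-- loop body of B's `for ch in s`; state = (total, count)
def pvBStep (st : Int × Int) (ch : Char) : Int × Int :=
  if ch ≠ '0' then (st.1 + (st.2 + 1), st.2 + 1) else (st.1, 0)

def num_sub_2_alt (s : String) : Int :=
  PySem.Int.mod (s.toList.foldl pvBStep (0, 0)).1 (10 ^ 9 + 7)

-- ===== PRECONDITION & SPEC =====
def Spec_num_sub_2 (s : String) (out : Int) : Prop := out = num_sub_2_alt s
instance (s : String) (out : Int) : Decidable (Spec_num_sub_2 s out) := by unfold Spec_num_sub_2; infer_instance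

-- ===== CLAIM (what is proved, stated in full; the proofs are below) =====
def Claim_equal_num_sub_2 : Prop := ∀ (s : String), Dom_num_sub_2 s → Spec_num_sub_2 s (num_sub_2 s)

-- ===== LEMMAS AND PROOFS =====

-- the pieces produced by splitting on a single '0', as a plain structural recursion
def pvPieces (l : List Char) (cur : List Char) : List (List Char) :=
  match l with
  | [] => [cur.reverse]
  | c :: rest => if c = '0' then cur.reverse :: pvPieces rest [] else pvPieces rest (c :: cur)

-- closed-form triangular term, as A computes it
def pvTerm (m : Nat) : Int := PySem.Int.floordiv ((m : Int) * ((m : Int) + 1)) 2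

theorem pvTerm_eq (m : Nat) : pvTerm m = ((m * (m + 1) / 2 : Nat) : Int) := by
  simp [pvTerm, PySem.Int.floordiv, Int.fdiv_eq_ediv]

theorem pvTerm_succ (k : Nat) : pvTerm (k + 1) = pvTerm k + (k + 1) := by
  rw [pvTerm_eq, pvTerm_eq]
  have h : (k + 1) * (k + 1 + 1) = k * (k + 1) + 2 * (k + 1) := by ring
  rw [h, Nat.add_mul_div_left _ _ (by norm_num : 0 < 2)]
  push_cast; ring

theorem pvGo_eq (l : List Char) : ∀ (fuel : Nat) (cur : List Char) (acc : List (List Char)),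
    l.length ≤ fuel →
    PySem.Chars.splitOn.go ['0'] fuel l cur acc = acc.reverse ++ pvPieces l cur := by
  induction l with
  | nil =>
    intro fuel cur acc _
    cases fuel <;> simp [PySem.Chars.splitOn.go, pvPieces]
  | cons c rest ih =>
    intro fuel cur acc hf
    cases fuel with
    | zero => simp at hf
    | succ f =>
      simp only [PySem.Chars.splitOn.go]
      by_cases hc : c = '0'
      · subst hc
        rw [if_pos (by simp [List.isPrefixOf])]
        simp only [List.length, List.drop]
        rw [ih f [] _ (by simpa using hf)]
        simp [pvPieces]
      · rw [if_neg (by simp [List.isPrefixOf]; intro h; exact hc h.symm)]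
        rw [ih f (c :: cur) acc (by simpa using hf)]
        simp [pvPieces, hc]

theorem pvAFold_init (ps : List (List Char)) : ∀ (x : Int),
    (ps.map String.ofList).foldl pvAStep x = x + (ps.map String.ofList).foldl pvAStep 0 := by
  induction ps with
  | nil => intro x; simp
  | cons p ps ih =>
    intro x
    simp only [List.map, List.foldl]
    rw [ih (pvAStep x _), ih (pvAStep 0 _)]
    simp [pvAStep, PySem.Str.len]
    split_ifs <;> ring

theorem pvAStep_eq (acc : Int) (p : List Char) :
    pvAStep acc (String.ofList p) = acc + pvTerm p.length := by
  simp only [pvAStep, PySem.Str.len, String.toList_ofList, pvTerm]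
  split_ifs with h
  · rfl
  · have : p.length = 0 := by omega
    simp [this, PySem.Int.floordiv]

theorem pvMain (l : List Char) : ∀ (cur : List Char) (total : Int),
    (l.foldl pvBStep (total, (cur.length : Int))).1
      = total - pvTerm cur.length + ((pvPieces l cur).map String.ofList).foldl pvAStep 0 := by
  induction l with
  | nil =>
    intro cur total
    simp [pvPieces, pvAStep_eq]
  | cons c rest ih =>
    intro cur total
    by_cases hc : c = '0'
    · subst hc
      simp only [List.foldl, pvBStep]
      rw [if_neg (by simp)]
      have h0 := ih [] total
      simp only [List.length] at h0
      rw [show ((0 : Nat) : Int) = 0 by rfl] at h0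
      rw [h0]
      have hp : pvPieces ('0' :: rest) cur = cur.reverse :: pvPieces rest [] := by
        simp [pvPieces]
      rw [hp]
      simp only [List.map, List.foldl]
      rw [pvAFold_init, pvAStep_eq]
      simp only [List.length_reverse, zero_add]
      rw [pvAFold_init (pvPieces rest []) (pvTerm cur.length)]
      have h00 : pvTerm 0 = 0 := by simp [pvTerm, PySem.Int.floordiv]
      rw [h00]
      ring
    · simp only [List.foldl, pvBStep]
      rw [if_pos hc]
      have h1 := ih (c :: cur) (total + ((cur.length : Int) + 1))
      simp only [List.length] at h1
      have hcast : ((cur.length + 1 : Nat) : Int) = (cur.length : Int) + 1 := by push_cast; ring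
      rw [hcast] at h1
      rw [h1]
      simp only [pvPieces, if_neg hc]
      rw [pvTerm_succ]
      ring

theorem pvSplit_eq (s : String) :
    (PySem.Str.split? s "0").getD [] = (pvPieces s.toList []).map String.ofList := by
  simp only [PySem.Str.split?, PySem.Chars.split?]
  rw [if_neg (by simp)]
  simp only [Option.map_some, Option.getD_some, PySem.Chars.splitOn]
  rw [show "0".toList = ['0'] from rfl, pvGo_eq s.toList (s.toList.length + 1) [] [] (by omega)]
  simp

-- ===== VERDICT (by name: the statement is the Claim_ definition above) =====
theorem num_sub_2_spec : Claim_equal_num_sub_2 := by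
  intro s _
  unfold Spec_num_sub_2 num_sub_2 num_sub_2_alt
  rw [pvSplit_eq]
  have h := pvMain s.toList [] 0
  simp only [List.length] at h
  rw [show ((0 : Nat) : Int) = 0 by rfl] at h
  have ht : pvTerm 0 = 0 := by simp [pvTerm, PySem.Int.floordiv]
  rw [ht] at h
  simp only [h]
  ring_nf
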